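-- pv_equiv track=rewrite | github.com/ahmedmeshref/June-LeetCoding-Challenge | day_19/longest_duplicate_substring.py | hash_fun
-- ===== SOURCE A (Python) =====
-- def hash_fun(nums, a, n, modulus, mid):
--     h = 0
--     for i in range(mid):
--         h = (h * a + nums[i]) % modulus
--     seen = {h}
--     # const value to be used often : a**L % modulus
--     aL = pow(a, mid, modulus)
--     for start in range(1, n - mid + 1):
--         # compute rolling hash in O(1) time
--         h = (h * a - nums[start - 1] * aL + nums[start + mid - 1]) % modulus
--         if h in seen:
--             return start
--         seen.add(h)
--     return None
-- ===== SOURCE B (Python) =====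
-- def hash_fun(nums, a, n, modulus, mid):
--     # Recompute each window's polynomial hash from scratch instead of
--     # maintaining a rolling hash (no pow(a, mid, modulus) constant needed).
--     def window(start):
--         h = 0
--         for i in range(start, start + mid):
--             h = (h * a + nums[i]) % modulus
--         return h
--     seen = {window(0)}
--     for start in range(1, n - mid + 1):
--         h = window(start)
--         if h in seen:
--             return start
--         seen.add(h)
--     return None
-- ===== Notes on version B (the rewrite author's own statement) =====
-- stated objective: simpler
-- what changed: B drops the O(1) rolling-hash update and the precomputed pow(a, mid, modulus) constant and the carried hash state, recomputing each window's polynomial hash from scratch with a nested loop.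
-- outside the precondition, e.g. on hash_fun([1, 2], -2, 3, 3, -1): A returns 2, B returns 1; on hash_fun([1, 2, 3], 2, 4, 3, 2): A returns 1, B returns 1; on hash_fun([1], 2, 2, 3, 0): A returns 1, B returns 1
import Mathlib
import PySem

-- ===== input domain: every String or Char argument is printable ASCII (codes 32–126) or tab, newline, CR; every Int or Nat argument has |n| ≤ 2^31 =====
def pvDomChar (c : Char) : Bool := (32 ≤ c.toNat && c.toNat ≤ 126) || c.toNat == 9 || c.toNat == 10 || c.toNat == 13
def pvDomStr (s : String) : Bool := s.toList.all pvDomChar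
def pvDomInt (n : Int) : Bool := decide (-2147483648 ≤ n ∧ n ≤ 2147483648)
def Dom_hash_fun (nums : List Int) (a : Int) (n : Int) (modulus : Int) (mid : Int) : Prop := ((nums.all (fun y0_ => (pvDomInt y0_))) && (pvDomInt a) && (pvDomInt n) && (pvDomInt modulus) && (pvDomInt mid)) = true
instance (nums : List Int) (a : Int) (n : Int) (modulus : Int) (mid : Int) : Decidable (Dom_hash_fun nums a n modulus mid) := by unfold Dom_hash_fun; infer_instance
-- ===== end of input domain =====

-- B replaces the O(1) rolling-hash update with a from-scratch polynomial hash of each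
-- window (same base/modulus, so identical hash values and return index): simpler, not faster.

-- ===== PORT A =====
-- the second loop of A, with early return: state = (rolling hash h, seen set)
def hashALoop (nums : List Int) (a : Int) (modulus : Int) (mid : Int) (aL : Int) :
    List Int → Int → PySem.Set Int → Option Int
  | [], _, _ => none
  | start :: rest, h, seen =>
    let h' := PySem.Int.mod (h * a - (PySem.List.pyGetD nums (start - 1) 0) * aL
                + PySem.List.pyGetD nums (start + mid - 1) 0) modulus
    if PySem.Set.contains seen h' then some start
    else hashALoop nums a modulus mid aL rest h' (PySem.Set.add seen h')

def hash_fun (nums : List Int) (a : Int) (n : Int) (modulus : Int) (mid : Int) : Option Int :=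
  let h := (PySem.List.pyRange 0 mid 1).foldl
    (fun h i => PySem.Int.mod (h * a + PySem.List.pyGetD nums i 0) modulus) 0
  let seen := PySem.Set.add PySem.Set.empty h
  -- pow(a, mid, modulus); mid ≥ 0 under Pre_, so the Nat exponent mid.toNat is exact
  let aL := PySem.Int.powMod a mid.toNat modulus
  hashALoop nums a modulus mid aL (PySem.List.pyRange 1 (n - mid + 1) 1) h seen

-- ===== PORT B =====
-- window(start): polynomial hash of nums[start .. start+mid), recomputed from scratch
def windowHash (nums : List Int) (a : Int) (modulus : Int) (start mid : Int) : Int :=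
  (PySem.List.pyRange start (start + mid) 1).foldl
    (fun h i => PySem.Int.mod (h * a + PySem.List.pyGetD nums i 0) modulus) 0

def hashBLoop (nums : List Int) (a : Int) (modulus : Int) (mid : Int) :
    List Int → PySem.Set Int → Option Int
  | [], _ => none
  | start :: rest, seen =>
    let h := windowHash nums a modulus start mid
    if PySem.Set.contains seen h then some start
    else hashBLoop nums a modulus mid rest (PySem.Set.add seen h)

def hash_fun_alt (nums : List Int) (a : Int) (n : Int) (modulus : Int) (mid : Int) : Option Int :=
  hashBLoop nums a modulus mid (PySem.List.pyRange 1 (n - mid + 1) 1)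
    (PySem.Set.add PySem.Set.empty (windowHash nums a modulus 0 mid))

-- ===== PRECONDITION & SPEC =====
-- Pre_ is the natural domain of the search (modulus ≠ 0, 0 ≤ mid, and each loop that runs
-- stays inside nums): outside it A raises (ZeroDivisionError/ValueError/IndexError) or, on
-- some inputs, still returns via negative-index wraparound, pow's modular inverse for mid < 0,
-- or a hash collision that stops the scan just before the out-of-range access — accidents of
-- A's indexing that are excluded.
def Pre_hash_fun (nums : List Int) (a : Int) (n : Int) (modulus : Int) (mid : Int) : Prop :=
  modulus ≠ 0 ∧ 0 ≤ mid ∧ (0 < mid → mid ≤ (nums.length : Int)) ∧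
    (mid < n → n ≤ (nums.length : Int))
instance (nums : List Int) (a : Int) (n : Int) (modulus : Int) (mid : Int) : Decidable (Pre_hash_fun nums a n modulus mid) := by unfold Pre_hash_fun; infer_instance

def pvWitness_hash_fun : List Int × Int × Int × Int × Int := ([1, 2, 1, 2], 3, 4, 7, 2)

def Spec_hash_fun (nums : List Int) (a : Int) (n : Int) (modulus : Int) (mid : Int) (out : Option Int) : Prop := out = hash_fun_alt nums a n modulus mid
instance (nums : List Int) (a : Int) (n : Int) (modulus : Int) (mid : Int) (out : Option Int) : Decidable (Spec_hash_fun nums a n modulus mid out) := by unfold Spec_hash_fun; infer_instance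

-- ===== CLAIM (what is proved, stated in full; the proofs are below) =====
def Claim_equal_hash_fun : Prop := ∀ (nums : List Int) (a : Int) (n : Int) (modulus : Int) (mid : Int), Dom_hash_fun nums a n modulus mid → Pre_hash_fun nums a n modulus mid → Spec_hash_fun nums a n modulus mid (hash_fun nums a n modulus mid)

-- ===== LEMMAS AND PROOFS =====

-- Python's % returns equal values on integers congruent mod m
theorem pymod_eq_of_dvd {m x y : Int} (hm : m ≠ 0) (h : m ∣ x - y) :
    PySem.Int.mod x m = PySem.Int.mod y m := by
  have hx := PySem.Int.floordiv_mul_add_mod x m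
  have hy := PySem.Int.floordiv_mul_add_mod y m
  obtain ⟨k, hk⟩ := h
  have hd : PySem.Int.mod x m - PySem.Int.mod y m
      = m * (k - PySem.Int.floordiv x m + PySem.Int.floordiv y m) := by
    linear_combination hx - hy + hk
  set t := k - PySem.Int.floordiv x m + PySem.Int.floordiv y m with ht
  rcases lt_trichotomy t 0 with h1 | h1 | h1
  · rcases lt_or_gt_of_ne hm with hneg | hpos
    · have bx := PySem.Int.mod_neg_bounds x hneg
      have by' := PySem.Int.mod_neg_bounds y hneg
      nlinarith [bx.1, bx.2, by'.1, by'.2]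
    · have bx := PySem.Int.mod_nonneg x hpos
      have by' := PySem.Int.mod_lt y hpos
      have bx2 := PySem.Int.mod_lt x hpos
      have by2 := PySem.Int.mod_nonneg y hpos
      nlinarith
  · rw [h1, mul_zero] at hd; omega
  · rcases lt_or_gt_of_ne hm with hneg | hpos
    · have bx := PySem.Int.mod_neg_bounds x hneg
      have by' := PySem.Int.mod_neg_bounds y hneg
      nlinarith [bx.1, bx.2, by'.1, by'.2]
    · have bx := PySem.Int.mod_nonneg x hpos
      have by' := PySem.Int.mod_lt y hpos
      have bx2 := PySem.Int.mod_lt x hpos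
      have by2 := PySem.Int.mod_nonneg y hpos
      nlinarith

-- mod z m ≡ z (mod m)
theorem dvd_pymod_sub (m z : Int) : m ∣ PySem.Int.mod z m - z := by
  have := PySem.Int.floordiv_mul_add_mod z m
  exact ⟨-(PySem.Int.floordiv z m), by linarith⟩

theorem pymod_zero (m : Int) : PySem.Int.mod 0 m = 0 :=
  (PySem.Int.mod_eq_zero_iff_dvd 0 m).mpr (dvd_zero m)

theorem pymod_idem (m z : Int) : PySem.Int.mod (PySem.Int.mod z m) m = PySem.Int.mod z m := by
  rcases eq_or_ne m 0 with rfl | hm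
  · have h1 := PySem.Int.floordiv_mul_add_mod z (0:Int)
    have h2 := PySem.Int.floordiv_mul_add_mod (PySem.Int.mod z 0) (0:Int)
    omega
  · exact pymod_eq_of_dvd hm (dvd_pymod_sub m z)

-- the reduced fold is congruent to the unreduced polynomial fold
theorem fold_cong (nums : List Int) (a m : Int) :
    ∀ (l : List Int) (x y : Int), m ∣ x - y →
      m ∣ (l.foldl (fun h i => PySem.Int.mod (h * a + PySem.List.pyGetD nums i 0) m) x
            - l.foldl (fun h i => h * a + PySem.List.pyGetD nums i 0) y) := by
  intro l
  induction l with
  | nil => intro x y h; simpa using h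
  | cons i rest ih =>
    intro x y h
    simp only [List.foldl_cons]
    apply ih
    have h1 := dvd_pymod_sub m (x * a + PySem.List.pyGetD nums i 0)
    have h2 : m ∣ (x * a + PySem.List.pyGetD nums i 0) - (y * a + PySem.List.pyGetD nums i 0) := by
      obtain ⟨k, hk⟩ := h
      exact ⟨k * a, by linear_combination hk * a⟩
    have h3 := dvd_add h1 h2
    have : PySem.Int.mod (x * a + PySem.List.pyGetD nums i 0) m - (x * a + PySem.List.pyGetD nums i 0) + ((x * a + PySem.List.pyGetD nums i 0) - (y * a + PySem.List.pyGetD nums i 0)) = PySem.Int.mod (x * a + PySem.List.pyGetD nums i 0) m - (y * a + PySem.List.pyGetD nums i 0) := by ring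
    rwa [this] at h3

-- unreduced polynomial over the window [s, s+k)
def upoly (nums : List Int) (a : Int) (s : Int) (k : Nat) : Int :=
  (PySem.List.pyRange s (s + k) 1).foldl (fun h i => h * a + PySem.List.pyGetD nums i 0) 0

theorem upoly_succ (nums : List Int) (a : Int) (s : Int) (k : Nat) :
    upoly nums a s (k + 1) = upoly nums a s k * a + PySem.List.pyGetD nums (s + k) 0 := by
  unfold upoly
  have h1 : s + ((k : Int) + 1) = (s + k) + 1 := by ring
  rw [show ((k + 1 : Nat) : Int) = (k : Int) + 1 by push_cast; ring, h1,
      PySem.List.pyRange_one_succ_right (by omega), List.foldl_append]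
  simp

-- the rolling-hash shift identity, exactly over the integers
theorem upoly_shift (nums : List Int) (a : Int) (k : Nat) : ∀ s : Int,
    upoly nums a (s - 1) k * a - PySem.List.pyGetD nums (s - 1) 0 * a ^ k
      + PySem.List.pyGetD nums (s - 1 + k) 0 = upoly nums a s k := by
  induction k with
  | zero => intro s; simp [upoly, PySem.List.pyRange_one_eq_nil]
  | succ k ih =>
    intro s
    have h1 := upoly_succ nums a (s - 1) k
    have h2 := upoly_succ nums a s k
    have h3 := ih s
    have e1 : (s - 1) + ((k : Int) + 1) = s + k := by ring
    rw [show ((k + 1 : Nat) : Int) = (k : Int) + 1 by push_cast; ring] at *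
    rw [h1, h2, ← h3]
    ring_nf

theorem windowHash_cong (nums : List Int) (a m s mid : Int) (hmid : 0 ≤ mid) :
    m ∣ (windowHash nums a m s mid - upoly nums a s mid.toNat) := by
  unfold windowHash upoly
  rw [show s + mid = s + (mid.toNat : Int) from by omega]
  exact fold_cong nums a m (PySem.List.pyRange s (s + (mid.toNat : Int)) 1) 0 0 (by simp)

-- a windowHash value carries an outermost mod (or is 0): it is a fixed point of mod
theorem fold_step_reduced (nums : List Int) (a m : Int) :
    ∀ (l : List Int) (h0 : Int), PySem.Int.mod h0 m = h0 →
      PySem.Int.mod (l.foldl (fun h i => PySem.Int.mod (h * a + PySem.List.pyGetD nums i 0) m) h0) m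
        = l.foldl (fun h i => PySem.Int.mod (h * a + PySem.List.pyGetD nums i 0) m) h0 := by
  intro l
  induction l with
  | nil => intro h0 hred; simpa using hred
  | cons i rest ih =>
    intro h0 hred
    simp only [List.foldl_cons]
    exact ih _ (pymod_idem m _)

theorem windowHash_reduced (nums : List Int) (a m : Int) (s mid : Int) :
    PySem.Int.mod (windowHash nums a m s mid) m = windowHash nums a m s mid :=
  fold_step_reduced nums a m _ 0 (pymod_zero m)

-- A's rolling update, fed any state congruent to the previous window's polynomial,
-- produces exactly B's recomputed window hash
theorem roll_eq_window (nums : List Int) (a m : Int) (hm : m ≠ 0) (mid : Int)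
    (hmid : 0 ≤ mid) (s h : Int) (hh : m ∣ h - upoly nums a (s - 1) mid.toNat) :
    PySem.Int.mod (h * a - PySem.List.pyGetD nums (s - 1) 0 * PySem.Int.powMod a mid.toNat m
        + PySem.List.pyGetD nums (s + mid - 1) 0) m
      = windowHash nums a m s mid := by
  have hg : s + mid - 1 = s - 1 + (mid.toNat : Int) := by omega
  rw [hg, PySem.Int.powMod, ← windowHash_reduced nums a m s mid]
  apply pymod_eq_of_dvd hm
  obtain ⟨k1, hk1⟩ := hh
  obtain ⟨k2, hk2⟩ := dvd_pymod_sub m (a ^ mid.toNat)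
  obtain ⟨k3, hk3⟩ := windowHash_cong nums a m s mid hmid
  have hsh := upoly_shift nums a mid.toNat s
  exact ⟨k1 * a - PySem.List.pyGetD nums (s - 1) 0 * k2 - k3,
    by linear_combination hk1 * a - PySem.List.pyGetD nums (s - 1) 0 * hk2 - hk3 + hsh⟩

-- the two loops agree on every consecutive start range, given the state invariant
theorem loops_eq (nums : List Int) (a m : Int) (hm : m ≠ 0) (mid : Int) (hmid : 0 ≤ mid) :
    ∀ (k : Nat) (s h : Int) (seen : PySem.Set Int),
      m ∣ h - upoly nums a (s - 1) mid.toNat →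
      hashALoop nums a m mid (PySem.Int.powMod a mid.toNat m)
          (PySem.List.pyRange s (s + k) 1) h seen
        = hashBLoop nums a m mid (PySem.List.pyRange s (s + k) 1) seen := by
  intro k
  induction k with
  | zero =>
    intro s h seen _
    rw [show s + ((0 : Nat) : Int) = s by simp, PySem.List.pyRange_one_eq_nil le_rfl]
    rfl
  | succ k ih =>
    intro s h seen hinv
    have hcons : PySem.List.pyRange s (s + ((k + 1 : Nat) : Int)) 1
        = s :: PySem.List.pyRange (s + 1) ((s + 1) + (k : Int)) 1 := by
      rw [PySem.List.pyRange_one_cons (by push_cast; omega)]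
      congr 1
      push_cast
      ring_nf
    rw [hcons]
    simp only [hashALoop, hashBLoop]
    rw [roll_eq_window nums a m hm mid hmid s h hinv]
    split_ifs with hmem
    · rfl
    · apply ih
      rw [show s + 1 - 1 = s from by omega]
      exact windowHash_cong nums a m s mid hmid

-- ===== VERDICT (by name: the statement is the Claim_ definition above) =====
theorem hash_fun_spec : Claim_equal_hash_fun := by
  intro nums a n modulus mid _ hpre
  obtain ⟨hm, hmid, -, -⟩ := hpre
  unfold Spec_hash_fun hash_fun hash_fun_alt
  have hW0 : (PySem.List.pyRange 0 mid 1).foldl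
      (fun h i => PySem.Int.mod (h * a + PySem.List.pyGetD nums i 0) modulus) 0
      = windowHash nums a modulus 0 mid := by
    rw [windowHash, zero_add]
  rw [hW0]
  by_cases hc : n - mid + 1 ≤ 1
  · -- both loops run over the empty range of starts
    rw [PySem.List.pyRange_one_eq_nil hc]
    rfl
  · -- both loops walk the starts 1 .. n-mid
    have hrange : PySem.List.pyRange 1 (n - mid + 1) 1
        = PySem.List.pyRange 1 (1 + ((n - mid).toNat : Int)) 1 := by
      congr 1
      omega
    rw [hrange]
    apply loops_eq nums a modulus hm mid hmid
    rw [show (1 : Int) - 1 = 0 by omega]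
    exact windowHash_cong nums a modulus 0 mid hmid
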